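-- pv_equiv track=rewrite | github.com/Streak306/PerfectLayout | core.py | _candidate_positions
-- ===== SOURCE A (Python) =====
-- from typing import Dict, List, Tuple, Optional, Callable, Iterable
--
-- def within_one_chunk(x: int, y: int, w: int, h: int, chunk_size: int = 4) -> bool:
--     """
--     Chunk rule:
--     - 1x1 can be anywhere.
--     - Any footprint larger than 1x1 must NOT cross a 4x4 chunk boundary.
--       (It must fit entirely inside one chunk.)
--     """
--     if w == 1 and h == 1:
--         return True
--     # which chunk is top-left in?
--     cx0 = x // chunk_size
--     cy0 = y // chunk_size
--     # which chunk is bottom-right in?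
--     cx1 = (x + w - 1) // chunk_size
--     cy1 = (y + h - 1) // chunk_size
--     return (cx0 == cx1) and (cy0 == cy1)
--
-- def rect_hits_blocked(x: int, y: int, w: int, h: int, blocked: set[Tuple[int,int]]) -> bool:
--     for yy in range(y, y + h):
--         for xx in range(x, x + w):
--             if (xx, yy) in blocked:
--                 return True
--     return False
--
-- def _candidate_positions(map_w: int, map_h: int, w: int, h: int, blocked: set[Tuple[int,int]], chunk_size: int) -> List[Tuple[int,int]]:
--     pos = []
--     for y in range(0, map_h - h + 1):
--         for x in range(0, map_w - w + 1):
--             if not within_one_chunk(x, y, w, h, chunk_size):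
--                 continue
--             if rect_hits_blocked(x, y, w, h, blocked):
--                 continue
--             pos.append((x,y))
--     return pos
-- ===== SOURCE B (Python) =====
-- def _candidate_positions(map_w, map_h, w, h, blocked, chunk_size):
--     # Axis-separated: the chunk rule constrains x and y independently, so filter
--     # each axis once; then test each surviving position against the blocked set
--     # by rectangle containment (one pass over blocked, no w*h cell scan).
--     ys = range(0, map_h - h + 1)
--     if not (w == 1 and h == 1):
--         ys = [y for y in ys if y // chunk_size == (y + h - 1) // chunk_size]
--     if not ys:
--         return []
--     xs = range(0, map_w - w + 1)
--     if not (w == 1 and h == 1):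
--         xs = [x for x in xs if x // chunk_size == (x + w - 1) // chunk_size]
--     def hits(x, y):
--         return any(x <= bx < x + w and y <= by < y + h for (bx, by) in blocked)
--     return [(x, y) for y in ys for x in xs if not hits(x, y)]
-- ===== Notes on version B (the rewrite author's own statement) =====
-- stated objective: alternative
-- what changed: B applies the chunk rule once per axis (filters valid x- and y-coordinates separately instead of re-checking the chunk per position) and replaces the per-position w*h cell scan with a single rectangle-containment pass over the blocked set.
-- outside the precondition, e.g. on _candidate_positions(0, 3, 2, 2, set(), 0): A returns [], B raises ZeroDivisionError
import Mathlib
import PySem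

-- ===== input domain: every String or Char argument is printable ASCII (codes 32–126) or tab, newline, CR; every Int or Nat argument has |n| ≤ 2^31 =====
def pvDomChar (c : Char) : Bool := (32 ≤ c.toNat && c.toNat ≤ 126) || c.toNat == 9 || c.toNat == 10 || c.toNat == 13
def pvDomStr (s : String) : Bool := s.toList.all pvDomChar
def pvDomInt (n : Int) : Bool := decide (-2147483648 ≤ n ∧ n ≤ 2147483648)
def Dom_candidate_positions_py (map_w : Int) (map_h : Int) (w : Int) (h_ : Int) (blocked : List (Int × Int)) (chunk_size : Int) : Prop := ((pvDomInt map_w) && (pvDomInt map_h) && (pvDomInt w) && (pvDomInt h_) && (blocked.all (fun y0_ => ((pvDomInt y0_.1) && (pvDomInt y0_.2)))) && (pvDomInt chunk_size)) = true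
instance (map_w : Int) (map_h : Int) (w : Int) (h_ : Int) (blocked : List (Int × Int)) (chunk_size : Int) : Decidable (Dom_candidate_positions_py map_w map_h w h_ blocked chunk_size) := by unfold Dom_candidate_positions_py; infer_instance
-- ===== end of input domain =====

-- B applies the chunk rule once per axis (filtering x- and y-candidates separately) and
-- tests each surviving position with one pass over the blocked set (rectangle containment)
-- instead of re-checking the chunk per position and scanning all w*h cells: alternative algorithm.

-- ===== PORT A =====
def within_one_chunk (x : Int) (y : Int) (w : Int) (h : Int) (chunk_size : Int) : Bool :=
  if w = 1 ∧ h = 1 then true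
  else
    let cx0 := PySem.Int.floordiv x chunk_size
    let cy0 := PySem.Int.floordiv y chunk_size
    let cx1 := PySem.Int.floordiv (x + w - 1) chunk_size
    let cy1 := PySem.Int.floordiv (y + h - 1) chunk_size
    decide (cx0 = cx1) && decide (cy0 = cy1)

def rect_hits_blocked (x : Int) (y : Int) (w : Int) (h : Int) (blocked : List (Int × Int)) : Bool :=
  -- the early-returning double loop over the cells, as an any-of-any
  (PySem.List.pyRange y (y + h)).any fun yy =>
    (PySem.List.pyRange x (x + w)).any fun xx => decide ((xx, yy) ∈ blocked)

def candidate_positions_py (map_w : Int) (map_h : Int) (w : Int) (h_ : Int) (blocked : List (Int × Int)) (chunk_size : Int) : List (Int × Int) :=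
  (PySem.List.pyRange 0 (map_h - h_ + 1)).foldl (fun pos y =>
    (PySem.List.pyRange 0 (map_w - w + 1)).foldl (fun pos x =>
      if ¬ within_one_chunk x y w h_ chunk_size then pos
      else if rect_hits_blocked x y w h_ blocked then pos
      else pos ++ [(x, y)]) pos) []

-- ===== PORT B =====
def pv_axis_ok (d : Int) (chunk_size : Int) (v : Int) : Bool :=
  decide (PySem.Int.floordiv v chunk_size = PySem.Int.floordiv (v + d - 1) chunk_size)

def pv_hits (w : Int) (h : Int) (x : Int) (y : Int) (blocked : List (Int × Int)) : Bool :=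
  blocked.any fun b => decide (x ≤ b.1 ∧ b.1 < x + w ∧ y ≤ b.2 ∧ b.2 < y + h)

def candidate_positions_py_alt (map_w : Int) (map_h : Int) (w : Int) (h_ : Int) (blocked : List (Int × Int)) (chunk_size : Int) : List (Int × Int) :=
  let ys0 := PySem.List.pyRange 0 (map_h - h_ + 1)
  let ys := if w = 1 ∧ h_ = 1 then ys0 else ys0.filter (pv_axis_ok h_ chunk_size)
  if ys = [] then []
  else
    let xs0 := PySem.List.pyRange 0 (map_w - w + 1)
    let xs := if w = 1 ∧ h_ = 1 then xs0 else xs0.filter (pv_axis_ok w chunk_size)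
    ys.flatMap fun y => (xs.filter fun x => !pv_hits w h_ x y blocked).map fun x => (x, y)

-- ===== PRECONDITION & SPEC =====
-- Pre_ excludes chunk_size = 0 for non-1×1 footprints: there Python A raises
-- ZeroDivisionError whenever any candidate position is examined and returns [] only
-- vacuously when a loop range is empty; B's axis filter divides by chunk_size and raises there too.
def Pre_candidate_positions_py (map_w : Int) (map_h : Int) (w : Int) (h_ : Int) (blocked : List (Int × Int)) (chunk_size : Int) : Prop :=
  chunk_size ≠ 0 ∨ (w = 1 ∧ h_ = 1)
instance (map_w : Int) (map_h : Int) (w : Int) (h_ : Int) (blocked : List (Int × Int)) (chunk_size : Int) : Decidable (Pre_candidate_positions_py map_w map_h w h_ blocked chunk_size) := by unfold Pre_candidate_positions_py; infer_instance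

def pvWitness_candidate_positions_py : Int × Int × Int × Int × (List (Int × Int)) × Int := (4, 4, 2, 2, [(1, 1)], 4)

def Spec_candidate_positions_py (map_w : Int) (map_h : Int) (w : Int) (h_ : Int) (blocked : List (Int × Int)) (chunk_size : Int) (out : List (Int × Int)) : Prop := out = candidate_positions_py_alt map_w map_h w h_ blocked chunk_size
instance (map_w : Int) (map_h : Int) (w : Int) (h_ : Int) (blocked : List (Int × Int)) (chunk_size : Int) (out : List (Int × Int)) : Decidable (Spec_candidate_positions_py map_w map_h w h_ blocked chunk_size out) := by unfold Spec_candidate_positions_py; infer_instance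

-- ===== CLAIM (what is proved, stated in full; the proofs are below) =====
def Claim_equal_candidate_positions_py : Prop := ∀ (map_w : Int) (map_h : Int) (w : Int) (h_ : Int) (blocked : List (Int × Int)) (chunk_size : Int), Dom_candidate_positions_py map_w map_h w h_ blocked chunk_size → Pre_candidate_positions_py map_w map_h w h_ blocked chunk_size → Spec_candidate_positions_py map_w map_h w h_ blocked chunk_size (candidate_positions_py map_w map_h w h_ blocked chunk_size)

-- ===== LEMMAS AND PROOFS =====

-- the cell-scan over the rectangle finds a blocked cell iff the blocked-list scan finds one in the rectangle
theorem rect_eq_hits (x y w h : Int) (blocked : List (Int × Int)) :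
    rect_hits_blocked x y w h blocked = pv_hits w h x y blocked := by
  rw [Bool.eq_iff_iff]
  simp only [rect_hits_blocked, pv_hits, List.any_eq_true, PySem.List.mem_pyRange_one,
    decide_eq_true_eq]
  constructor
  · rintro ⟨yy, hyy, xx, hxx, hmem⟩
    exact ⟨(xx, yy), hmem, by omega, by omega, by omega, by omega⟩
  · rintro ⟨⟨bx, by'⟩, hmem, h1, h2, h3, h4⟩
    exact ⟨by', ⟨h3, h4⟩, bx, ⟨h1, h2⟩, hmem⟩

-- one row of A's double loop, as filter-then-map
theorem rowA (X : List Int) (y w h cs : Int) (blocked : List (Int × Int)) (acc : List (Int × Int)) :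
    X.foldl (fun pos x =>
      if ¬ within_one_chunk x y w h cs then pos
      else if rect_hits_blocked x y w h blocked then pos
      else pos ++ [(x, y)]) acc
    = acc ++ (X.filter (fun x => within_one_chunk x y w h cs && !rect_hits_blocked x y w h blocked)).map (fun x => (x, y)) := by
  rw [PySem.List.foldl_congr_mem X _
    (fun pos x => if (within_one_chunk x y w h cs && !rect_hits_blocked x y w h blocked) then pos ++ [(x, y)] else pos) acc
    (by intro acc x _
        by_cases h1 : within_one_chunk x y w h cs <;>
          by_cases h2 : rect_hits_blocked x y w h blocked <;> simp [h1, h2])]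
  exact PySem.List.foldl_append_if _ _ X acc

-- flatMap may skip elements whose image is empty
theorem flatMap_filter_nil {α β : Type} (l : List α) (p : α → Bool) (g : α → List β)
    (hg : ∀ a ∈ l, p a = false → g a = []) : l.flatMap g = (l.filter p).flatMap g := by
  induction l with
  | nil => rfl
  | cons a t ih =>
    by_cases hp : p a
    · simp [hp, ih (fun b hb => hg b (List.mem_cons_of_mem a hb))]
    · simp only [Bool.not_eq_true] at hp
      simp [hp, hg a List.mem_cons_self hp,
        ih (fun b hb => hg b (List.mem_cons_of_mem a hb))]

theorem flatMap_congr_mem {α β : Type} (l : List α) (f g : α → List β)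
    (h : ∀ a ∈ l, f a = g a) : l.flatMap f = l.flatMap g := by
  induction l with
  | nil => rfl
  | cons a t ih =>
    simp [List.flatMap_cons, h a List.mem_cons_self,
      ih (fun b hb => h b (List.mem_cons_of_mem a hb))]

-- B's early return on an empty row list is invisible in the result (flatMap over [] is [])
theorem alt_eq_flatMap (map_w map_h w h_ : Int) (blocked : List (Int × Int)) (chunk_size : Int) :
    candidate_positions_py_alt map_w map_h w h_ blocked chunk_size
      = (if w = 1 ∧ h_ = 1 then PySem.List.pyRange 0 (map_h - h_ + 1)
         else (PySem.List.pyRange 0 (map_h - h_ + 1)).filter (pv_axis_ok h_ chunk_size)).flatMap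
          (fun y => ((if w = 1 ∧ h_ = 1 then PySem.List.pyRange 0 (map_w - w + 1)
              else (PySem.List.pyRange 0 (map_w - w + 1)).filter (pv_axis_ok w chunk_size)).filter
            (fun x => !pv_hits w h_ x y blocked)).map (fun x => (x, y))) := by
  unfold candidate_positions_py_alt
  by_cases h11 : w = 1 ∧ h_ = 1
  · simp only [if_pos h11]
    split_ifs with hys
    · rw [hys, List.flatMap_nil]
    · rfl
  · simp only [if_neg h11]
    split_ifs with hys
    · rw [hys, List.flatMap_nil]
    · rfl

-- for non-1×1 footprints the chunk test is the conjunction of two independent axis tests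
theorem within_split (x y w h cs : Int) (h11 : ¬ (w = 1 ∧ h = 1)) :
    within_one_chunk x y w h cs = (pv_axis_ok w cs x && pv_axis_ok h cs y) := by
  simp [within_one_chunk, pv_axis_ok, if_neg h11]

-- ===== VERDICT (by name: the statement is the Claim_ definition above) =====
theorem candidate_positions_py_spec : Claim_equal_candidate_positions_py := by
  intro map_w map_h w h_ blocked chunk_size _ _
  unfold Spec_candidate_positions_py candidate_positions_py
  rw [alt_eq_flatMap]
  rw [PySem.List.foldl_congr_mem (PySem.List.pyRange 0 (map_h - h_ + 1)) _
    (fun pos y => pos ++ ((PySem.List.pyRange 0 (map_w - w + 1)).filter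
      (fun x => within_one_chunk x y w h_ chunk_size && !rect_hits_blocked x y w h_ blocked)).map (fun x => (x, y))) []
    (by intro acc y _; exact rowA _ y w h_ chunk_size blocked acc)]
  rw [PySem.List.foldl_append_eq_flatMap, List.nil_append]
  by_cases h11 : w = 1 ∧ h_ = 1
  · simp only [if_pos h11]
    apply flatMap_congr_mem
    intro y _
    congr 1
    apply List.filter_congr
    intro x _
    simp [within_one_chunk, h11, rect_eq_hits]
  · simp only [if_neg h11]
    rw [flatMap_filter_nil (PySem.List.pyRange 0 (map_h - h_ + 1)) (pv_axis_ok h_ chunk_size) _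
      (by intro y _ hy
          rw [List.map_eq_nil_iff, List.filter_eq_nil_iff]
          intro x _
          simp [within_split x y w h_ chunk_size h11, hy])]
    apply flatMap_congr_mem
    intro y hy
    have hcY : pv_axis_ok h_ chunk_size y = true := (List.mem_filter.mp hy).2
    rw [List.filter_filter]
    congr 1
    apply List.filter_congr
    intro x _
    simp [within_split x y w h_ chunk_size h11, hcY, rect_eq_hits, Bool.and_comm]
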